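-- pv_equiv track=rewrite | github.com/Tbabm/TEval-plus | rqs/features.py | cal_distinct_strs
-- ===== SOURCE A (Python) =====
-- from typing import List, Set
-- from itertools import chain
--
-- def cal_distinct_strs(strs: List[Set]):
--     results = []
--     pre_invos = set()
--     for idx, invo in enumerate(strs):
--         suc_invos = set(chain(*strs[idx + 1:]))
--         distinct_invos = (invo - pre_invos) - suc_invos
--         results.append(distinct_invos)
--         pre_invos.update(invo)
--     return results
-- ===== SOURCE B (Python) =====
-- from typing import List, Set
--
-- def cal_distinct_strs(strs: List[Set]):
--     # one reverse pass precomputes suffix unions, then one forward pass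
--     sufs = []
--     acc = set()
--     for invo in reversed(strs):
--         sufs.append(acc)
--         acc = acc | invo
--     sufs.reverse()
--     results = []
--     pre = set()
--     for invo, suf in zip(strs, sufs):
--         results.append({x for x in invo if x not in pre and x not in suf})
--         pre.update(invo)
--     return results
-- ===== Notes on version B (the rewrite author's own statement) =====
-- stated objective: faster
-- what changed: Instead of re-flattening and re-hashing the entire suffix strs[idx+1:] at every index, B precomputes all suffix unions in one reverse pass and then filters each set against the incremental prefix set and its precomputed suffix set in one forward pass.
import Mathlib
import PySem

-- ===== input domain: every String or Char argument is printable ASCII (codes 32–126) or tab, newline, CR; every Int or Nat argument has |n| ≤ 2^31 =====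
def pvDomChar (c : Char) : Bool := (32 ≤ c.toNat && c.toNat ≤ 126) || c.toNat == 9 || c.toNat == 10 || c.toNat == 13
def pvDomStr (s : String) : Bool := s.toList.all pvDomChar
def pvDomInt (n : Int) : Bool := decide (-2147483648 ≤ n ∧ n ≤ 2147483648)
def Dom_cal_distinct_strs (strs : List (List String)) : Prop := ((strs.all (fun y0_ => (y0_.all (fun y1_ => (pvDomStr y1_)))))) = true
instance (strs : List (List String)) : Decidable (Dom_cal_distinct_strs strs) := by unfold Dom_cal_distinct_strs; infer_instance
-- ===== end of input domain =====

-- B replaces A's per-index re-flattening of the whole suffix by one reverse pass that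
-- precomputes all suffix unions, then one forward pass (measured faster on large inputs).

-- ===== PORT A =====
-- for idx, invo: suc = set(chain(*strs[idx+1:])); results.append((invo - pre) - suc); pre.update(invo)
def cal_distinct_strs (strs : List (List String)) : List (List String) :=
  ((PySem.List.enumerate strs).foldl
    (fun st p =>
      let suc := PySem.Set.ofList (PySem.List.slice strs (some (p.1 + 1)) none).flatten
      (st.1 ++ [PySem.Set.diff (PySem.Set.diff (PySem.Set.ofList p.2) st.2) suc],
       PySem.Set.update st.2 p.2))
    ([], PySem.Set.empty)).1

-- ===== PORT B =====
-- reverse pass building the list of suffix unions, then a forward pass with an incremental prefix set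
def cal_distinct_strs_alt (strs : List (List String)) : List (List String) :=
  let sufs := ((strs.reverse.foldl
      (fun st invo => (st.1 ++ [st.2], PySem.Set.union st.2 invo))
      ([], PySem.Set.empty)).1).reverse
  ((strs.zip sufs).foldl
    (fun st p =>
      (st.1 ++ [PySem.Set.ofList ((PySem.Set.ofList p.1).filter
          (fun x => !(PySem.Set.contains st.2 x) && !(PySem.Set.contains p.2 x)))],
       PySem.Set.update st.2 p.1))
    ([], PySem.Set.empty)).1

-- ===== PRECONDITION & SPEC =====
def Spec_cal_distinct_strs (strs : List (List String)) (out : List (List String)) : Prop := out = cal_distinct_strs_alt strs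
instance (strs : List (List String)) (out : List (List String)) : Decidable (Spec_cal_distinct_strs strs out) := by unfold Spec_cal_distinct_strs; infer_instance

-- ===== CLAIM (what is proved, stated in full; the proofs are below) =====
def Claim_equal_cal_distinct_strs : Prop := ∀ (strs : List (List String)), Dom_cal_distinct_strs strs → Spec_cal_distinct_strs strs (cal_distinct_strs strs)

-- ===== LEMMAS AND PROOFS =====

-- the common per-position value: the (deduplicated) current set filtered by
-- "not seen in the prefix set, not occurring in the flattened suffix"
def pvSpecGo (pre : PySem.Set String) : List (List String) → List (List String)
  | [] => []
  | invo :: rest =>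
      (PySem.Set.ofList invo).filter
        (fun x => !(PySem.Set.contains pre x) && !(rest.flatten.contains x))
      :: pvSpecGo (PySem.Set.update pre invo) rest

-- A's per-step element, rewritten as a single filter
lemma pv_elemA (invo : List String) (pre : PySem.Set String) (flat : List String) :
    PySem.Set.diff (PySem.Set.diff (PySem.Set.ofList invo) pre) (PySem.Set.ofList flat)
      = (PySem.Set.ofList invo).filter
          (fun x => !(PySem.Set.contains pre x) && !(flat.contains x)) := by
  show List.filter _ (List.filter _ _) = _
  rw [List.filter_filter]
  refine List.filter_congr ?_
  intro x _
  simp [PySem.Set.contains, Bool.and_comm]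

-- A's loop over enumerate(strs), started at position k with state (acc, pre), computes pvSpecGo
lemma pv_aFold (strs : List (List String)) :
    ∀ (rest : List (List String)) (k : Nat) (acc : List (List String)) (pre : PySem.Set String),
      strs.drop k = rest →
      ((PySem.List.enumerate rest (k:Int)).foldl
        (fun st p =>
          let suc := PySem.Set.ofList (PySem.List.slice strs (some (p.1 + 1)) none).flatten
          (st.1 ++ [PySem.Set.diff (PySem.Set.diff (PySem.Set.ofList p.2) st.2) suc],
           PySem.Set.update st.2 p.2))
        (acc, pre)).1 = acc ++ pvSpecGo pre rest := by
  intro rest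
  induction rest with
  | nil => intro k acc pre h; simp [PySem.List.enumerate, pvSpecGo]
  | cons invo rest ih =>
    intro k acc pre h
    have hdrop : strs.drop (k+1) = rest := by
      have := congrArg (List.drop 1) h
      simpa [List.drop_drop, Nat.add_comm] using this
    have hslice : PySem.List.slice strs (some ((k:Int) + 1)) none = rest := by
      rw [PySem.List.slice_from strs (by omega : (0:Int) ≤ (k:Int)+1)]
      have h2 : ((k:Int)+1).toNat = k + 1 := by omega
      rw [h2, hdrop]
    have hcast : (k:Int) + 1 = ((k+1 : Nat) : Int) := by push_cast; ring
    simp only [PySem.List.enumerate, List.foldl_cons]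
    rw [hslice, hcast, ih (k+1) _ _ hdrop]
    simp [pvSpecGo, pv_elemA]

-- B's reverse pass: the list of suffix sets and the running union
def pvSufs (strs : List (List String)) : List (PySem.Set String) :=
  ((strs.reverse.foldl
      (fun st invo => (st.1 ++ [st.2], PySem.Set.union st.2 invo))
      ([], PySem.Set.empty)).1).reverse

def pvAcc (strs : List (List String)) : PySem.Set String :=
  (strs.reverse.foldl
      (fun st invo => (st.1 ++ [st.2], PySem.Set.union st.2 invo))
      ([], PySem.Set.empty)).2

lemma pv_sufs_cons (invo : List String) (rest : List (List String)) :
    pvSufs (invo :: rest) = pvAcc rest :: pvSufs rest := by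
  simp [pvSufs, pvAcc]

lemma pv_acc_cons (invo : List String) (rest : List (List String)) :
    pvAcc (invo :: rest) = PySem.Set.union (pvAcc rest) invo := by
  simp [pvAcc]

lemma pv_mem_acc (strs : List (List String)) (x : String) :
    x ∈ pvAcc strs ↔ x ∈ strs.flatten := by
  induction strs with
  | nil => simp [pvAcc]
  | cons invo rest ih =>
    rw [pv_acc_cons]
    simp [PySem.Set.mem_union, ih]
    exact Or.comm

-- B's forward pass over zip(strs, sufs) computes pvSpecGo too
lemma pv_bFold :
    ∀ (strs : List (List String)) (acc : List (List String)) (pre : PySem.Set String),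
      ((strs.zip (pvSufs strs)).foldl
        (fun st p =>
          (st.1 ++ [PySem.Set.ofList ((PySem.Set.ofList p.1).filter
              (fun x => !(PySem.Set.contains st.2 x) && !(PySem.Set.contains p.2 x)))],
           PySem.Set.update st.2 p.1))
        (acc, pre)).1 = acc ++ pvSpecGo pre strs := by
  intro strs
  induction strs with
  | nil => intro acc pre; simp [pvSufs, pvSpecGo]
  | cons invo rest ih =>
    intro acc pre
    rw [pv_sufs_cons]
    simp only [List.zip_cons_cons, List.foldl_cons]
    rw [ih]
    have helem : PySem.Set.ofList ((PySem.Set.ofList invo).filter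
          (fun x => !(PySem.Set.contains pre x) && !(PySem.Set.contains (pvAcc rest) x)))
        = (PySem.Set.ofList invo).filter
          (fun x => !(PySem.Set.contains pre x) && !(rest.flatten.contains x)) := by
      have hfc : (PySem.Set.ofList invo).filter
            (fun x => !(PySem.Set.contains pre x) && !(PySem.Set.contains (pvAcc rest) x))
          = (PySem.Set.ofList invo).filter
            (fun x => !(PySem.Set.contains pre x) && !(rest.flatten.contains x)) := by
        refine List.filter_congr ?_
        intro x _
        have : PySem.Set.contains (pvAcc rest) x = rest.flatten.contains x := by
          have hmem := pv_mem_acc rest x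
          simp only [PySem.Set.contains]
          cases hc1 : (pvAcc rest).contains x <;>
            cases hc2 : List.contains rest.flatten x <;> simp_all
        rw [this]
      rw [hfc]
      exact PySem.Set.ofList_eq_self_of_nodup _
        (List.Nodup.filter _ (PySem.Set.nodup_ofList invo))
    rw [helem]
    simp [pvSpecGo]

-- ===== VERDICT (by name: the statement is the Claim_ definition above) =====
theorem cal_distinct_strs_spec : Claim_equal_cal_distinct_strs := by
  intro strs _
  unfold Spec_cal_distinct_strs
  have ha : cal_distinct_strs strs = pvSpecGo PySem.Set.empty strs := by
    have := pv_aFold strs strs 0 [] PySem.Set.empty (by simp)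
    simpa [cal_distinct_strs] using this
  have hb : cal_distinct_strs_alt strs = pvSpecGo PySem.Set.empty strs := by
    have := pv_bFold strs [] PySem.Set.empty
    simpa [cal_distinct_strs_alt, pvSufs] using this
  rw [ha, hb]
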